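-- pv_equiv track=rewrite | github.com/JeremyKalfus/AutoMath | artifacts/r-k4e-k4e-k4e-three-uniform-hypergraph-ramsey/cyclic_search.py | orbit_rep
-- ===== SOURCE A (Python) =====
-- N = 13
--
-- def orbit_rep(triple):
--     pts = sorted(triple)
--     reps = []
--     for shift in range(N):
--         shifted = sorted(((x - shift) % N) for x in pts)
--         if shifted[0] == 0:
--             reps.append(tuple(shifted))
--     return min(reps)
-- ===== SOURCE B (Python) =====
-- N = 13
--
-- def orbit_rep(triple):
--     # counting-sort approach: tally residues once, then read each candidate
--     # directly off the rotated count table while keeping a running minimum.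
--     cnt = {}
--     for x in triple:
--         r = x % N
--         cnt[r] = cnt.get(r, 0) + 1
--     best = None
--     for p in range(N):
--         if cnt.get(p, 0) == 0:
--             continue
--         cand = []
--         for r in range(N):
--             cand += [r] * cnt.get((p + r) % N, 0)
--         cand = tuple(cand)
--         if best is None or cand < best:
--             best = cand
--     return best
-- ===== Notes on version B (the rewrite author's own statement) =====
-- stated objective: faster
-- what changed: A comparison-sorts the shifted residues for each of the 13 shifts and takes min of the collected list; B never sorts: it tallies residues mod 13 into a counter in one pass, emits each candidate by reading the rotated count table (counting sort), and keeps a running minimum.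
import Mathlib
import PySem

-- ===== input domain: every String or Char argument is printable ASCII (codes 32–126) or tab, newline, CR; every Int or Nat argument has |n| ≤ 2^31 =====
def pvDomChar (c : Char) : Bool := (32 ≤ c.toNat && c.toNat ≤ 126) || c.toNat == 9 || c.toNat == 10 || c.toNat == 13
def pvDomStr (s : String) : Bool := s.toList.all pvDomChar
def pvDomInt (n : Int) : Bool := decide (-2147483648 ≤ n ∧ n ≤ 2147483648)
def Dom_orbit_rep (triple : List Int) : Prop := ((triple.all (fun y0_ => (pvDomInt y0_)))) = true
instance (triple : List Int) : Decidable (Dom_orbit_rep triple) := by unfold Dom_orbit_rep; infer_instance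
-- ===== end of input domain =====

-- B replaces A's per-shift comparison sort (sort triple, for each of the 13 shifts sort the
-- shifted residues, filter on head 0, min of the collected list) by a counting-sort scheme:
-- tally the residues once into a counter, emit each candidate by reading the rotated count
-- table (no sorting at all), and keep a running minimum; objective: alternative.

-- ===== PORT A =====
def orbit_rep (triple : List Int) : List Int :=
  let pts := PySem.List.sorted triple (fun x => x)
  let reps := (PySem.List.pyRange 0 13 1).foldl (fun reps shift =>
    let shifted := PySem.List.sorted (pts.map (fun x => PySem.Int.mod (x - shift) 13)) (fun x => x)
    if PySem.List.pyGetD shifted 0 0 == 0 then reps ++ [shifted] else reps) []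
  (PySem.List.min? reps (fun x => x)).getD []

-- ===== PORT B =====
def orbit_rep_alt (triple : List Int) : List Int :=
  let cnt : PySem.Dict Int Int := triple.foldl
    (fun d x => d.insert (PySem.Int.mod x 13) (d.getD (PySem.Int.mod x 13) 0 + 1)) PySem.Dict.empty
  let best := (PySem.List.pyRange 0 13 1).foldl (fun best p =>
    if cnt.getD p 0 == 0 then best
    else
      let cand := (PySem.List.pyRange 0 13 1).foldl
        (fun acc r => acc ++ PySem.List.pyRepeat [r] (cnt.getD (PySem.Int.mod (p + r) 13) 0)) []
      match best with
      | none => some cand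
      | some b => if cand < b then some cand else some b) none
  best.getD []

-- ===== PRECONDITION & SPEC =====
-- Pre_ excludes only the empty tuple, on which Python A raises IndexError (shifted[0])
-- and Python B returns None (no candidate), not a tuple.
def Pre_orbit_rep (triple : List Int) : Prop := triple ≠ []
instance (triple : List Int) : Decidable (Pre_orbit_rep triple) := by unfold Pre_orbit_rep; infer_instance
def pvWitness_orbit_rep : List Int := [1, 2, 5]

def Spec_orbit_rep (triple : List Int) (out : List Int) : Prop := out = orbit_rep_alt triple
instance (triple : List Int) (out : List Int) : Decidable (Spec_orbit_rep triple out) := by unfold Spec_orbit_rep; infer_instance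

-- ===== CLAIM (what is proved, stated in full; the proofs are below) =====
def Claim_equal_orbit_rep : Prop := ∀ (triple : List Int), Dom_orbit_rep triple → Pre_orbit_rep triple → Spec_orbit_rep triple (orbit_rep triple)

-- ===== LEMMAS AND PROOFS =====

-- the candidate anchored at shift s: sorted list of (x - s) % 13 over the triple
def pvCand (triple : List Int) (s : Int) : List Int :=
  PySem.List.sorted (triple.map (fun x => PySem.Int.mod (x - s) 13)) (fun x => x)

-- B's way of emitting a candidate: the value r repeated (c r) times, for r along R
def pvRuns (c : Int → Nat) (R : List Int) : List Int :=
  R.flatMap (fun r => List.replicate (c r) r)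

-- sorting the triple first does not change a candidate
lemma pvCand_sorted (triple : List Int) (s : Int) :
    PySem.List.sorted ((PySem.List.sorted triple (fun x => x)).map (fun x => PySem.Int.mod (x - s) 13)) (fun x => x)
      = pvCand triple s := by
  unfold pvCand
  exact PySem.List.sorted_eq_sorted_of_perm _ _ _ (fun a b h => h)
    ((PySem.List.sorted_perm triple (fun x => x) false).map _)

-- head of a candidate is 0 iff some point of the triple is ≡ s (mod 13)
lemma pvHead_zero_iff (triple : List Int) (s : Int) (h : triple ≠ []) :
    (PySem.List.pyGetD (pvCand triple s) 0 0 = 0) ↔ ∃ x ∈ triple, PySem.Int.mod (x - s) 13 = 0 := by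
  have hne : pvCand triple s ≠ [] := by
    unfold pvCand
    rw [Ne, PySem.List.sorted_eq_nil_iff, List.map_eq_nil_iff]
    exact h
  obtain ⟨m, t, hmt⟩ := List.exists_cons_of_ne_nil hne
  rw [hmt, PySem.List.pyGetD_zero_cons]
  constructor
  · intro hm0
    have hmem : m ∈ pvCand triple s := by rw [hmt]; exact List.mem_cons_self
    unfold pvCand at hmem
    rw [PySem.List.mem_sorted, List.mem_map] at hmem
    obtain ⟨x, hx, hxe⟩ := hmem
    exact ⟨x, hx, by rw [hxe, hm0]⟩
  · rintro ⟨x, hx, hx0⟩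
    have h0map : (0 : Int) ∈ triple.map (fun x => PySem.Int.mod (x - s) 13) :=
      List.mem_map.mpr ⟨x, hx, hx0⟩
    have hle : m ≤ 0 :=
      PySem.List.key_head_sorted_le (triple.map (fun x => PySem.Int.mod (x - s) 13)) (fun x => x)
        (by unfold pvCand at hmt; exact hmt) 0 h0map
    have hge : 0 ≤ m := by
      have hmem : m ∈ pvCand triple s := by rw [hmt]; exact List.mem_cons_self
      unfold pvCand at hmem
      rw [PySem.List.mem_sorted, List.mem_map] at hmem
      obtain ⟨x', _, hxe⟩ := hmem
      rw [← hxe]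
      exact PySem.Int.mod_nonneg _ (by norm_num)
    omega

-- runs along a nondecreasing R are nondecreasing
lemma pvRuns_pairwise (c : Int → Nat) (R : List Int) (h : R.Pairwise (· ≤ ·)) :
    (pvRuns c R).Pairwise (· ≤ ·) := by
  induction R with
  | nil => simp [pvRuns]
  | cons r R ih =>
    rw [List.pairwise_cons] at h
    unfold pvRuns
    rw [List.flatMap_cons, List.pairwise_append]
    refine ⟨?_, ih h.2, ?_⟩
    · exact List.pairwise_replicate.mpr (Or.inr le_rfl)
    · intro a ha b hb
      rw [List.eq_of_mem_replicate ha]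
      rw [List.mem_flatMap] at hb
      obtain ⟨r', hr', hb'⟩ := hb
      rw [List.eq_of_mem_replicate hb']
      exact h.1 r' hr'

-- counting elements of runs
lemma pvRuns_count (c : Int → Nat) (R : List Int) (hnd : R.Nodup) (v : Int) :
    (pvRuns c R).count v = if v ∈ R then c v else 0 := by
  induction R with
  | nil => simp [pvRuns]
  | cons r R ih =>
    rw [List.nodup_cons] at hnd
    unfold pvRuns
    rw [List.flatMap_cons, List.count_append]
    have := ih hnd.2
    unfold pvRuns at this
    rw [this, List.count_replicate]
    by_cases hv : v = r
    · subst hv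
      simp [hnd.1]
    · simp [List.mem_cons, hv, Ne.symm hv]

-- runs realize any multiset whose members lie on R with matching counts
lemma pvRuns_perm (c : Int → Nat) (R m : List Int) (hnd : R.Nodup)
    (h1 : ∀ v ∈ m, v ∈ R) (h2 : ∀ r ∈ R, c r = m.count r) :
    (pvRuns c R).Perm m := by
  rw [List.perm_iff_count]
  intro v
  rw [pvRuns_count c R hnd v]
  by_cases hv : v ∈ R
  · simp [hv, h2 v hv]
  · simp only [hv, if_false]
    exact (List.count_eq_zero.mpr (fun hm => hv (h1 v hm))).symm

-- counting sort: sorting a list of residues in [0,13) is reading the count table in order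
lemma pvCounting (m : List Int) (hm : ∀ v ∈ m, 0 ≤ v ∧ v < 13) :
    PySem.List.sorted m (fun x => x)
      = pvRuns (fun r => m.count r) (PySem.List.pyRange 0 13 1) := by
  apply PySem.List.sorted_id_eq_of_perm_of_pairwise
  · exact pvRuns_perm _ _ m (by decide)
      (fun v hv => PySem.List.mem_pyRange_one.mpr (hm v hv)) (fun _ _ => rfl)
  · exact pvRuns_pairwise _ _ (by decide)

-- the counter built by B holds the residue counts
lemma pvCnt_getD (triple : List Int) (v : Int) :
    (triple.foldl (fun d x => d.insert (PySem.Int.mod x 13) (d.getD (PySem.Int.mod x 13) 0 + 1))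
        PySem.Dict.empty).getD v 0
      = ((triple.map (fun x => PySem.Int.mod x 13)).count v : Int) := by
  rw [← List.foldl_map (f := fun x => PySem.Int.mod x 13)
    (g := fun (d : PySem.Dict Int Int) x => d.insert x (d.getD x 0 + 1))]
  rw [PySem.Dict.getD_foldl_insert_add_one]
  simp [PySem.Dict.empty, PySem.Dict.getD, PySem.Dict.get?]

-- rotating the residue count table = counting the shifted residues
lemma pvCount_shift (triple : List Int) (p r : Int) (hr0 : 0 ≤ r) (hr : r < 13) :
    (triple.map (fun x => PySem.Int.mod x 13)).count (PySem.Int.mod (p + r) 13)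
      = (triple.map (fun x => PySem.Int.mod (x - p) 13)).count r := by
  simp only [List.count, List.countP_map]
  apply List.countP_congr
  intro x _
  simp only [Function.comp, beq_iff_eq,
    PySem.Int.mod_eq_emod_of_pos (show (0:Int) < 13 by norm_num)]
  omega

-- B's skip condition is the negation of A's keep condition, shift by shift
lemma pvCond_iff (triple : List Int) (s : Int) (h : triple ≠ []) (hs0 : 0 ≤ s) (hs : s < 13) :
    ((triple.map (fun x => PySem.Int.mod x 13)).count s = 0)
      ↔ ¬ (PySem.List.pyGetD (pvCand triple s) 0 0 = 0) := by
  rw [pvHead_zero_iff triple s h, List.count_eq_zero, List.mem_map]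
  constructor
  · rintro hno ⟨x, hx, hx0⟩
    refine hno ⟨x, hx, ?_⟩
    simp only [PySem.Int.mod_eq_emod_of_pos (show (0:Int) < 13 by norm_num)] at hx0 ⊢
    omega
  · rintro hno ⟨x, hx, hxs⟩
    refine hno ⟨x, hx, ?_⟩
    simp only [PySem.Int.mod_eq_emod_of_pos (show (0:Int) < 13 by norm_num)] at hxs ⊢
    omega

-- B's emitted candidate at an anchor equals A's sorted candidate
lemma pvCand_emit (triple : List Int) (p : Int) :
    (PySem.List.pyRange 0 13 1).foldl
        (fun acc r => acc ++ PySem.List.pyRepeat [r]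
          ((triple.foldl (fun d x => d.insert (PySem.Int.mod x 13) (d.getD (PySem.Int.mod x 13) 0 + 1))
            PySem.Dict.empty).getD (PySem.Int.mod (p + r) 13) 0)) []
      = pvCand triple p := by
  rw [PySem.List.foldl_append_eq_flatMap, List.nil_append]
  unfold pvCand
  rw [pvCounting (triple.map (fun x => PySem.Int.mod (x - p) 13)) ?_]
  · unfold pvRuns
    rw [List.flatMap_def, List.flatMap_def]
    congr 1
    apply List.map_congr_left
    intro r hr
    rw [PySem.List.mem_pyRange_one] at hr
    rw [pvCnt_getD, pvCount_shift triple p r hr.1 hr.2, PySem.List.pyRepeat_singleton,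
      Int.toNat_natCast]
  · intro v hv
    rw [List.mem_map] at hv
    obtain ⟨x, _, hx⟩ := hv
    rw [← hx]
    exact ⟨PySem.Int.mod_nonneg _ (by norm_num), PySem.Int.mod_lt _ (by norm_num)⟩


-- the running-minimum update step of B
def pvUpd (triple : List Int) (best : Option (List Int)) (p : Int) : Option (List Int) :=
  match best with
  | none => some (pvCand triple p)
  | some b => if pvCand triple p < b then some (pvCand triple p) else some b

-- B's whole loop, rewritten: filter on the kept shifts, then a running minimum = min?
lemma pvFoldB (triple : List Int) (hpre : triple ≠ []) :
    (PySem.List.pyRange 0 13 1).foldl (fun best p =>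
      if ((triple.foldl (fun (d : PySem.Dict Int Int) x => d.insert (PySem.Int.mod x 13) (d.getD (PySem.Int.mod x 13) 0 + 1))
            PySem.Dict.empty).getD p 0 == 0) = true then best
      else
        match best with
        | none => some ((PySem.List.pyRange 0 13 1).foldl
            (fun acc r => acc ++ PySem.List.pyRepeat [r]
              ((triple.foldl (fun (d : PySem.Dict Int Int) x => d.insert (PySem.Int.mod x 13) (d.getD (PySem.Int.mod x 13) 0 + 1))
                PySem.Dict.empty).getD (PySem.Int.mod (p + r) 13) 0)) [])
        | some b =>
          if (PySem.List.pyRange 0 13 1).foldl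
              (fun acc r => acc ++ PySem.List.pyRepeat [r]
                ((triple.foldl (fun (d : PySem.Dict Int Int) x => d.insert (PySem.Int.mod x 13) (d.getD (PySem.Int.mod x 13) 0 + 1))
                  PySem.Dict.empty).getD (PySem.Int.mod (p + r) 13) 0)) [] < b
          then some ((PySem.List.pyRange 0 13 1).foldl
              (fun acc r => acc ++ PySem.List.pyRepeat [r]
                ((triple.foldl (fun (d : PySem.Dict Int Int) x => d.insert (PySem.Int.mod x 13) (d.getD (PySem.Int.mod x 13) 0 + 1))
                  PySem.Dict.empty).getD (PySem.Int.mod (p + r) 13) 0)) [])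
          else some b) none
      = PySem.List.min?
          (((PySem.List.pyRange 0 13 1).filter
              (fun s => PySem.List.pyGetD (pvCand triple s) 0 0 == 0)).map (pvCand triple))
          (fun x => x) := by
  rw [PySem.List.foldl_congr_mem' (PySem.List.pyRange 0 13 1) _
    (fun best p =>
      if (fun s => PySem.List.pyGetD (pvCand triple s) 0 0 == 0) p = true
      then pvUpd triple best p else best) none ?_]
  · rw [PySem.List.foldl_if_eq_foldl_filter, PySem.List.min?, List.foldl_map]
    exact PySem.List.foldl_congr_mem' _ _ _ _ (fun x _ acc => by cases acc <;> rfl)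
  · intro p hp best
    rw [PySem.List.mem_pyRange_one] at hp
    rw [pvCand_emit]
    simp only [pvCnt_getD, beq_iff_eq, Int.natCast_eq_zero]
    by_cases hc : ((triple.map (fun x => PySem.Int.mod x 13)).count p = 0)
    · have hnc := (pvCond_iff triple p hpre hp.1 hp.2).mp hc
      rw [if_pos hc, if_neg hnc]
    · have hhead : PySem.List.pyGetD (pvCand triple p) 0 0 = 0 := by
        by_contra hx
        exact hc ((pvCond_iff triple p hpre hp.1 hp.2).mpr hx)
      rw [if_neg hc, if_pos hhead]
      cases best <;> rfl

-- ===== VERDICT (by name: the statement is the Claim_ definition above) =====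
theorem orbit_rep_spec : Claim_equal_orbit_rep := by
  intro triple _ hpre
  simp only [Spec_orbit_rep, orbit_rep, orbit_rep_alt]
  -- A side: the kept shifts, as a filtered map
  have hfoldA : (fun (reps : List (List Int)) (shift : Int) =>
      let shifted := PySem.List.sorted ((PySem.List.sorted triple (fun x => x)).map
        (fun x => PySem.Int.mod (x - shift) 13)) (fun x => x)
      if PySem.List.pyGetD shifted 0 0 == 0 then reps ++ [shifted] else reps)
      = (fun reps s =>
        if (fun s => PySem.List.pyGetD (pvCand triple s) 0 0 == 0) s = true
        then reps ++ [pvCand triple s] else reps) := by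
    funext reps s
    simp only [pvCand_sorted]
  rw [hfoldA, PySem.List.foldl_append_if, List.nil_append]
  -- B side: same filter, same candidates, running minimum = min?
  rw [pvFoldB triple hpre]
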